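-- pv_equiv track=rewrite | github.com/Haroong/Algorithm | BaekJoon Online Judge/Silver/1652-누울 자리를 찾아라.py | calculate_col
-- ===== SOURCE A (Python) =====
-- STREAK_EMPTY_ZONE = 2
--
-- def calculate_col(room):
--     col = 0
--
--     for index, value in enumerate(room):
--         count = 0
--         found_sleep_zone = True
--
--         for j in range(len(room)):
--             if room[j][index] == '.': # 빈 영역
--                 if found_sleep_zone:
--                     count += 1
--                     if count == STREAK_EMPTY_ZONE: # 가로로 눕기 가능
--                         col += 1
--                         count = 0
--                         found_sleep_zone = False # 다음번 장애물이 나타날 때 까지 카운트 x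
--                 else:
--                     continue
--             else: # 벽
--                 count = 0
--                 found_sleep_zone = True
--
--     return col
-- ===== SOURCE B (Python) =====
-- def _count_runs(col):
--     # count maximal runs of '.' of length >= 2 in col
--     total = 0
--     while col:
--         if col[0] == '.':
--             run = 1
--             while run < len(col) and col[run] == '.':
--                 run += 1
--             if run >= 2:
--                 total += 1
--             col = col[run:]
--         else:
--             col = col[1:]
--     return total
--
-- def calculate_col(room):
--     n = len(room)
--     total = 0
--     for index in range(n):
--         col = [room[j][index] for j in range(n)]
--         total += _count_runs(col)
--     return total
-- ===== Notes on version B (the rewrite author's own statement) =====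
-- stated objective: simpler
-- what changed: Replaces A's count/skip-flag state machine threaded through a per-column scan with an explicit decomposition: extract each column as a list, then count its maximal runs of '.' of length >= 2 by jumping run-by-run.
import Mathlib
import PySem

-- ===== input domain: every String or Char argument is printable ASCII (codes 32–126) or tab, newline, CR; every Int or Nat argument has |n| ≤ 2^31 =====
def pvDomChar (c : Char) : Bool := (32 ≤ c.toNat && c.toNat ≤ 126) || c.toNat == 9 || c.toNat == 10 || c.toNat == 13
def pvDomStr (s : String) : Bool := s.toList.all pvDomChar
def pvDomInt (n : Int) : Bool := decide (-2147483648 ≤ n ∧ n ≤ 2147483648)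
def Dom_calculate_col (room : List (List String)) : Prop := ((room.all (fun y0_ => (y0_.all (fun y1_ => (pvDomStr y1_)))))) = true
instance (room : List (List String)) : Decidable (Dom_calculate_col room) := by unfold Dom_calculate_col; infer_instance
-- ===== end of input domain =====

-- B replaces A's count/skip-flag state machine with an explicit "extract column,
-- then count maximal runs of '.' of length ≥ 2" decomposition (objective: simpler).

-- ===== PORT A =====
-- literal transliteration of A: outer loop over enumerate(room), inner loop over
-- range(len(room)) threading state (col, count, found_sleep_zone).
def calculate_col (room : List (List String)) : Int :=
  (PySem.List.enumerate room 0).foldl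
    (fun col iv =>
      ((PySem.List.pyRange 0 (room.length : Int) 1).foldl
        (fun (st : Int × Int × Bool) j =>
          -- room[j][index]: out of range would be an IndexError, excluded by Pre_
          if PySem.List.pyGetD (PySem.List.pyGetD room j []) iv.1 "" = "." then
            if st.2.2 then
              if st.2.1 + 1 = 2 then (st.1 + 1, 0, false)
              else (st.1, st.2.1 + 1, true)
            else st
          else (st.1, 0, true))
        (col, 0, true)).1)
    0

-- ===== PORT B =====
-- B-side helper: the inner 'while run < len(col) and col[run] == ".": run += 1'
-- of _count_runs counts 1 + (length of the '.'-prefix of the rest); pvRunLen is that prefix length.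
def pvRunLen : List String → Nat
  | [] => 0
  | c :: rest => if c = "." then pvRunLen rest + 1 else 0

-- _count_runs from Source B: while col: jump run-by-run over suffixes (col = col[run:] / col[1:])
def pvCountRuns : List String → Int → Int
  | [], total => total
  | c :: rest, total =>
    if c = "." then
      pvCountRuns ((c :: rest).drop (1 + pvRunLen rest))
        (if 1 + pvRunLen rest ≥ 2 then total + 1 else total)
    else pvCountRuns rest total
  termination_by col => col.length
  decreasing_by
  · simp [List.length_drop]
  · simp

def calculate_col_alt (room : List (List String)) : Int :=
  (PySem.List.pyRange 0 (room.length : Int) 1).foldl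
    (fun total index =>
      pvCountRuns
        ((PySem.List.pyRange 0 (room.length : Int) 1).map
          (fun j => PySem.List.pyGetD (PySem.List.pyGetD room j []) index ""))
        total)
    0

-- ===== PRECONDITION & SPEC =====
-- Pre_ excludes exactly the ragged inputs where some row is shorter than the number of
-- rows: there Python A raises IndexError on room[j][index] (B raises the same way).
def Pre_calculate_col (room : List (List String)) : Prop :=
  ∀ row ∈ room, room.length ≤ row.length
instance (room : List (List String)) : Decidable (Pre_calculate_col room) := by
  unfold Pre_calculate_col; infer_instance

def pvWitness_calculate_col : List (List String) :=
  [[".", ".", "#"], [".", "#", "."], [".", ".", "."]]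

def Spec_calculate_col (room : List (List String)) (out : Int) : Prop := out = calculate_col_alt room
instance (room : List (List String)) (out : Int) : Decidable (Spec_calculate_col room out) := by unfold Spec_calculate_col; infer_instance

-- ===== CLAIM (what is proved, stated in full; the proofs are below) =====
def Claim_equal_calculate_col : Prop := ∀ (room : List (List String)), Dom_calculate_col room → Pre_calculate_col room → Spec_calculate_col room (calculate_col room)

-- ===== LEMMAS AND PROOFS =====

-- A's inner-loop step, factored out for the proofs (definitionally the port's lambda body)
def pvStepA (st : Int × Int × Bool) (c : String) : Int × Int × Bool :=
  if c = "." then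
    if st.2.2 then
      if st.2.1 + 1 = 2 then (st.1 + 1, 0, false)
      else (st.1, st.2.1 + 1, true)
    else st
  else (st.1, 0, true)

lemma pvStepA_dot_zero (total : Int) : pvStepA (total, 0, true) "." = (total, 1, true) := by
  norm_num [pvStepA]

lemma pvStepA_dot_one (total : Int) : pvStepA (total, 1, true) "." = (total + 1, 0, false) := by
  norm_num [pvStepA]

lemma pvStepA_dot_skip (total : Int) : pvStepA (total, 0, false) "." = (total, 0, false) := by
  simp [pvStepA]

lemma pvStepA_wall (st : Int × Int × Bool) {c : String} (h : c ≠ ".") :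
    pvStepA st c = (st.1, 0, true) := by
  simp [pvStepA, h]

lemma pv_drop_runLen (cs : List String) :
    cs.drop (pvRunLen cs) = cs.dropWhile (fun x => x = ".") := by
  induction cs with
  | nil => rfl
  | cons c rest ih =>
      by_cases h : c = "." <;> simp [pvRunLen, List.dropWhile, h, ih]

-- unfolding lemmas for pvCountRuns, one per shape of the head of the column
lemma pvCountRuns_wall {c : String} (rest : List String) (total : Int) (h : c ≠ ".") :
    pvCountRuns (c :: rest) total = pvCountRuns rest total := by
  rw [pvCountRuns]; simp [h]

lemma pvCountRuns_dot_nil (total : Int) : pvCountRuns ["."] total = total := by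
  rw [pvCountRuns]; simp [pvRunLen, pvCountRuns]

lemma pvCountRuns_dot_wall {d : String} (rest' : List String) (total : Int) (hd : d ≠ ".") :
    pvCountRuns ("." :: d :: rest') total = pvCountRuns rest' total := by
  rw [pvCountRuns]
  simp [pvRunLen, hd, pvCountRuns_wall rest' total hd]

lemma pvCountRuns_dot_dot (rest' : List String) (total : Int) :
    pvCountRuns ("." :: "." :: rest') total
      = pvCountRuns (rest'.dropWhile (fun x => x = ".")) (total + 1) := by
  rw [pvCountRuns]
  have h2 : 1 + pvRunLen ("." :: rest') ≥ 2 := by simp [pvRunLen]; omega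
  have hidx : 1 + pvRunLen ("." :: rest') = (pvRunLen rest' + 1) + 1 := by
    simp [pvRunLen]; omega
  rw [if_pos rfl, if_pos h2, hidx, List.drop_succ_cons, List.drop_succ_cons,
      pv_drop_runLen]

-- core: A's state machine over a column equals B's run counter
lemma pv_core (n : Nat) :
    ∀ cs : List String, cs.length ≤ n → ∀ total : Int,
      ((cs.foldl pvStepA (total, 0, true)).1 = pvCountRuns cs total ∧
       (cs.foldl pvStepA (total, 0, false)).1
         = pvCountRuns (cs.dropWhile (fun x => x = ".")) total) := by
  induction n with
  | zero =>
      intro cs hlen total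
      have : cs = [] := List.eq_nil_of_length_eq_zero (Nat.le_zero.mp hlen)
      subst this
      simp [pvCountRuns]
  | succ n ih =>
      intro cs hlen total
      match cs with
      | [] => simp [pvCountRuns]
      | c :: rest =>
        have hr : rest.length ≤ n := by simp at hlen; omega
        constructor
        · -- main, state (total, 0, true)
          by_cases h : c = "."
          · subst h
            match rest with
            | [] =>
                simp only [List.foldl, pvStepA_dot_zero, pvCountRuns_dot_nil]
            | d :: rest' =>
              have hr' : rest'.length ≤ n := by simp at hlen; omega
              by_cases hd : d = "."
              · subst hd
                -- second '.': A scores and flips to skip mode; B scores the run and jumps past it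
                rw [List.foldl_cons, pvStepA_dot_zero, List.foldl_cons, pvStepA_dot_one,
                    (ih rest' hr' (total + 1)).2, pvCountRuns_dot_dot]
              · -- lone '.', then a wall
                rw [List.foldl_cons, pvStepA_dot_zero, List.foldl_cons, pvStepA_wall _ hd,
                    (ih rest' hr' total).1, pvCountRuns_dot_wall rest' total hd]
          · -- wall first
            rw [List.foldl_cons, pvStepA_wall _ h, (ih rest hr total).1,
                pvCountRuns_wall rest total h]
        · -- skip mode, state (total, 0, false)
          by_cases h : c = "."
          · subst h
            rw [List.foldl_cons, pvStepA_dot_skip, (ih rest hr total).2]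
            simp [List.dropWhile]
          · rw [List.foldl_cons, pvStepA_wall _ h, (ih rest hr total).1]
            simp [List.dropWhile, h, pvCountRuns_wall rest total h]

lemma pv_inner (room : List (List String)) (i : Int) (total : Int) :
    ((PySem.List.pyRange 0 (room.length : Int) 1).foldl
      (fun (st : Int × Int × Bool) j =>
        if PySem.List.pyGetD (PySem.List.pyGetD room j []) i "" = "." then
          if st.2.2 then
            if st.2.1 + 1 = 2 then (st.1 + 1, 0, false)
            else (st.1, st.2.1 + 1, true)
          else st
        else (st.1, 0, true))
      (total, 0, true)).1
    = pvCountRuns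
        ((PySem.List.pyRange 0 (room.length : Int) 1).map
          (fun j => PySem.List.pyGetD (PySem.List.pyGetD room j []) i ""))
        total := by
  have hfun : (fun (st : Int × Int × Bool) j =>
      if PySem.List.pyGetD (PySem.List.pyGetD room j []) i "" = "." then
        if st.2.2 then
          if st.2.1 + 1 = 2 then (st.1 + 1, 0, false)
          else (st.1, st.2.1 + 1, true)
        else st
      else (st.1, 0, true))
      = (fun (st : Int × Int × Bool) j =>
          pvStepA st (PySem.List.pyGetD (PySem.List.pyGetD room j []) i "")) := rfl
  rw [hfun, ← List.foldl_map]
  exact (pv_core _ _ (le_refl _) total).1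

-- ===== VERDICT (by name: the statement is the Claim_ definition above) =====
theorem calculate_col_spec : Claim_equal_calculate_col := by
  intro room _ _
  unfold Spec_calculate_col calculate_col calculate_col_alt
  have henum : (PySem.List.enumerate room 0).map (·.1)
      = PySem.List.pyRange 0 (room.length : Int) 1 := by
    simpa using PySem.List.map_fst_enumerate room 0
  calc (PySem.List.enumerate room 0).foldl _ 0
      = ((PySem.List.enumerate room 0).map (·.1)).foldl
          (fun col i =>
            ((PySem.List.pyRange 0 (room.length : Int) 1).foldl
              (fun (st : Int × Int × Bool) j =>
                if PySem.List.pyGetD (PySem.List.pyGetD room j []) i "" = "." then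
                  if st.2.2 then
                    if st.2.1 + 1 = 2 then (st.1 + 1, 0, false)
                    else (st.1, st.2.1 + 1, true)
                  else st
                else (st.1, 0, true))
              (col, 0, true)).1) 0 := by
        rw [List.foldl_map]
    _ = _ := by
        rw [henum]
        exact congrArg (fun f => List.foldl f (0 : Int) (PySem.List.pyRange 0 (room.length : Int) 1))
          (funext fun a => funext fun i => pv_inner room i a)
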